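-- pv_equiv track=rewrite | github.com/vunvulear/azure-iac-checker | src/iac_checker/parser/arm/arm_parser.py | _find_resource_line
-- ===== SOURCE A (Python) =====
-- from typing import Any, Dict, List, Optional
--
-- def _find_resource_line(raw_lines: List[str], arm_type: str, arm_name: str) -> int:
--     """Find the approximate line number for a resource in the JSON."""
--     # Search for the type string
--     type_lower = arm_type.lower()
--     for i, line in enumerate(raw_lines, start=1):
--         if type_lower in line.lower() and "type" in line.lower():
--             return i
--     # Fallback: search for the name
--     for i, line in enumerate(raw_lines, start=1):
--         if arm_name in line:
--             return i
--     return 1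
-- ===== SOURCE B (Python) =====
-- def _find_resource_line(raw_lines, arm_type, arm_name):
--     """Single pass: type match wins immediately; first name match is remembered."""
--     type_lower = arm_type.lower()
--     name_line = None
--     for i, line in enumerate(raw_lines, start=1):
--         low = line.lower()
--         if type_lower in low and "type" in low:
--             return i
--         if name_line is None and arm_name in line:
--             name_line = i
--     return name_line if name_line is not None else 1
-- ===== Notes on version B (the rewrite author's own statement) =====
-- stated objective: alternative
-- what changed: Merges A's two sequential scans into one pass that returns immediately on a type match while remembering the first name match as a fallback, and lowercases each line once instead of twice.
import Mathlib
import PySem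

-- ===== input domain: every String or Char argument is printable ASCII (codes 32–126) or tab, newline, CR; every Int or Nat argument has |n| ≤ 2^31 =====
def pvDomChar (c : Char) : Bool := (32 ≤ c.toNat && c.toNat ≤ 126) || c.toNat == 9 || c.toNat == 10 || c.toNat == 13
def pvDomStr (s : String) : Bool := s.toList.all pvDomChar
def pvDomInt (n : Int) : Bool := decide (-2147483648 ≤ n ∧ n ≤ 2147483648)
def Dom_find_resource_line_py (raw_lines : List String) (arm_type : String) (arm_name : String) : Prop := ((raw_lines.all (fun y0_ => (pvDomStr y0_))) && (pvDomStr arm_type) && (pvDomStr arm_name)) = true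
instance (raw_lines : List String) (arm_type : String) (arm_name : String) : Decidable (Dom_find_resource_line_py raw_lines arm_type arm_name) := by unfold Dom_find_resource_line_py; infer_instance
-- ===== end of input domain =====

-- B merges A's two sequential scans into one pass (type match wins immediately,
-- first name match is remembered as a fallback); same return value on every input.
-- ===== PORT A =====
def pvA_typeLoop (type_lower : String) (lines : List String) (i : Int) : Option Int :=
  match lines with
  | [] => none
  | l :: rest =>
    if PySem.Str.isIn type_lower (PySem.Str.lower l) && PySem.Str.isIn "type" (PySem.Str.lower l)
    then some i else pvA_typeLoop type_lower rest (i + 1)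

def pvA_nameLoop (arm_name : String) (lines : List String) (i : Int) : Option Int :=
  match lines with
  | [] => none
  | l :: rest =>
    if PySem.Str.isIn arm_name l then some i else pvA_nameLoop arm_name rest (i + 1)

def find_resource_line_py (raw_lines : List String) (arm_type : String) (arm_name : String) : Int :=
  match pvA_typeLoop (PySem.Str.lower arm_type) raw_lines 1 with
  | some i => i
  | none =>
    match pvA_nameLoop arm_name raw_lines 1 with
    | some i => i
    | none => 1

-- ===== PORT B =====
def pvB_loop (type_lower arm_name : String) (lines : List String) (i : Int) (name_line : Option Int) : Int :=
  match lines with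
  | [] => name_line.getD 1
  | l :: rest =>
    let low := PySem.Str.lower l
    if PySem.Str.isIn type_lower low && PySem.Str.isIn "type" low then i
    else pvB_loop type_lower arm_name rest (i + 1)
      (if name_line.isNone && PySem.Str.isIn arm_name l then some i else name_line)

def find_resource_line_py_alt (raw_lines : List String) (arm_type : String) (arm_name : String) : Int :=
  pvB_loop (PySem.Str.lower arm_type) arm_name raw_lines 1 none

-- ===== PRECONDITION & SPEC =====
def Spec_find_resource_line_py (raw_lines : List String) (arm_type : String) (arm_name : String) (out : Int) : Prop := out = find_resource_line_py_alt raw_lines arm_type arm_name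
instance (raw_lines : List String) (arm_type : String) (arm_name : String) (out : Int) : Decidable (Spec_find_resource_line_py raw_lines arm_type arm_name out) := by unfold Spec_find_resource_line_py; infer_instance

-- ===== CLAIM (what is proved, stated in full; the proofs are below) =====
def Claim_equal_find_resource_line_py : Prop := ∀ (raw_lines : List String) (arm_type : String) (arm_name : String), Dom_find_resource_line_py raw_lines arm_type arm_name → Spec_find_resource_line_py raw_lines arm_type arm_name (find_resource_line_py raw_lines arm_type arm_name)

-- ===== LEMMAS AND PROOFS =====

-- ===== VERDICT (by name: the statement is the Claim_ definition above) =====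
theorem pvB_loop_eq (tl an : String) (lines : List String) (i : Int) (nl : Option Int) :
    pvB_loop tl an lines i nl
      = (pvA_typeLoop tl lines i).getD (nl.getD ((pvA_nameLoop an lines i).getD 1)) := by
  induction lines generalizing i nl with
  | nil => simp [pvB_loop, pvA_typeLoop, pvA_nameLoop]
  | cons l rest ih =>
    simp only [pvB_loop, pvA_typeLoop, pvA_nameLoop]
    by_cases ht : (PySem.Str.isIn tl (PySem.Str.lower l) && PySem.Str.isIn "type" (PySem.Str.lower l)) = true
    · rw [if_pos ht, if_pos ht, Option.getD_some]
    · rw [if_neg ht, if_neg ht, ih]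
      cases nl with
      | some v => simp
      | none =>
        split_ifs <;> simp_all

theorem find_resource_line_py_spec : Claim_equal_find_resource_line_py := by
  intro raw_lines arm_type arm_name _
  show find_resource_line_py raw_lines arm_type arm_name = find_resource_line_py_alt raw_lines arm_type arm_name
  unfold find_resource_line_py find_resource_line_py_alt
  rw [pvB_loop_eq]
  cases pvA_typeLoop (PySem.Str.lower arm_type) raw_lines 1 with
  | some i => simp
  | none =>
    cases pvA_nameLoop arm_name raw_lines 1 with
    | some i => simp
    | none => simp
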